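-- pv_equiv track=rewrite | github.com/kirillyat/itmo-algo | contest1/K.py | min_time_to_copy
-- ===== SOURCE A (Python) =====
-- def is_enough_time(mid, n, x, y):
--     total_copies = mid // x + mid // y
--     return total_copies >= n
--
-- def min_time_to_copy(n, x, y):
--     if x > y:
--         x, y = y, x
--
--     low = x
--     high = x * n
--
--     while low < high:
--         mid = (low + high) // 2
--         if is_enough_time(mid - x, n - 1, x, y):
--             high = mid
--         else:
--             low = mid + 1
--
--     return low
-- ===== SOURCE B (Python) =====
-- def min_time_to_copy(n, x, y):
--     lo, hi = (x, y) if x <= y else (y, x)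
--     if n <= 1 or lo <= 0:
--         return lo
--     k = n - 1
--     t = lo + hi
--     a = -((-k * hi) // t)   # least a with a*lo copies-by-slow schedule: a + a*lo//hi >= k
--     b = -((-k * lo) // t)   # least b with b + b*hi//lo >= k
--     return min(a * lo, b * hi) + lo
-- ===== Notes on version B (the rewrite author's own statement) =====
-- stated objective: alternative
-- what changed: Replaces A's binary search over [x, x*n] with a closed-form computation: the answer is min(a*lo, b*hi)+lo where a=ceil((n-1)*hi/(lo+hi)) and b=ceil((n-1)*lo/(lo+hi)) are the least multiples of each copier's time reaching n-1 extra copies.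
-- outside the precondition, e.g. on min_time_to_copy(-8, -8, -8): A returns 64, B returns -8; on min_time_to_copy(0, -2, 0): A raises ZeroDivisionError, B returns -2
import Mathlib
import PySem

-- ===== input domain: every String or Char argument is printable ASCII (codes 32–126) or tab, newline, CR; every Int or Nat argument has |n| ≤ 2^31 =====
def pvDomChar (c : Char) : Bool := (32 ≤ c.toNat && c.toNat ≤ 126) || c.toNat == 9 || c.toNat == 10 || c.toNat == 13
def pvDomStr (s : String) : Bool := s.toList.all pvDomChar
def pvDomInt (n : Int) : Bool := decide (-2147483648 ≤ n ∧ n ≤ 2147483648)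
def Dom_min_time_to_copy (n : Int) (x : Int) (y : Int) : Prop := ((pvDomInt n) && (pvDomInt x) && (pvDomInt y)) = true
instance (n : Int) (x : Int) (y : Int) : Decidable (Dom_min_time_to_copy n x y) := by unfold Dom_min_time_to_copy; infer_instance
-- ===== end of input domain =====

-- B replaces A's binary search by a closed-form ceiling-division formula (objective: alternative).

-- ===== PORT A =====
def is_enough_time (mid : Int) (n : Int) (x : Int) (y : Int) : Bool :=
  decide (PySem.Int.floordiv mid x + PySem.Int.floordiv mid y ≥ n)

-- the `while low < high` loop of A
def pvLoopA (n : Int) (x : Int) (y : Int) (low : Int) (high : Int) : Int :=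
  if h : low < high then
    let mid := PySem.Int.floordiv (low + high) 2
    if is_enough_time (mid - x) (n - 1) x y then
      pvLoopA n x y low mid
    else
      pvLoopA n x y (mid + 1) high
  else low
termination_by (high - low).toNat
decreasing_by
  · have hm : PySem.Int.floordiv (low + high) 2 < high :=
      (PySem.Int.floordiv_lt_iff_lt_mul (by omega)).2 (by omega)
    omega
  · have hl : low ≤ PySem.Int.floordiv (low + high) 2 :=
      (PySem.Int.le_floordiv_iff_mul_le (by omega)).2 (by omega)
    omega

def min_time_to_copy (n : Int) (x : Int) (y : Int) : Int :=
  let p := if x > y then (y, x) else (x, y)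
  pvLoopA n p.1 p.2 p.1 (p.1 * n)

-- ===== PORT B =====
def min_time_to_copy_alt (n : Int) (x : Int) (y : Int) : Int :=
  let lo := if x ≤ y then x else y
  let hi := if x ≤ y then y else x
  if n ≤ 1 ∨ lo ≤ 0 then lo
  else
    let k := n - 1
    let t := lo + hi
    let a := -(PySem.Int.floordiv (-(k * hi)) t)
    let b := -(PySem.Int.floordiv (-(k * lo)) t)
    min (a * lo) (b * hi) + lo

-- ===== PRECONDITION & SPEC =====
-- Pre_ excludes inputs where both copier times are nonpositive (the smaller negative) and n ≤ 0,
-- outside the problem's domain: there A either raises ZeroDivisionError (when the larger time is 0)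
-- or its binary search returns the accidental upper search bound min(x,y)*n; B returns min(x, y).
def Pre_min_time_to_copy (n : Int) (x : Int) (y : Int) : Prop := ¬ (min x y < 0 ∧ n ≤ 0 ∧ max x y ≤ 0)
instance (n : Int) (x : Int) (y : Int) : Decidable (Pre_min_time_to_copy n x y) := by
  unfold Pre_min_time_to_copy; infer_instance

def pvWitness_min_time_to_copy : Int × Int × Int := (4, 2, 3)

def Spec_min_time_to_copy (n : Int) (x : Int) (y : Int) (out : Int) : Prop := out = min_time_to_copy_alt n x y
instance (n : Int) (x : Int) (y : Int) (out : Int) : Decidable (Spec_min_time_to_copy n x y out) := by unfold Spec_min_time_to_copy; infer_instance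

-- ===== CLAIM (what is proved, stated in full; the proofs are below) =====
def Claim_equal_min_time_to_copy : Prop := ∀ (n : Int) (x : Int) (y : Int), Dom_min_time_to_copy n x y → Pre_min_time_to_copy n x y → Spec_min_time_to_copy n x y (min_time_to_copy n x y)

-- ===== LEMMAS AND PROOFS =====

-- A's predicate is monotone when both divisors are positive
lemma enough_mono (n x y : Int) (hx : 0 < x) (hy : 0 < y) {s t : Int} (hst : s ≤ t)
    (hs : is_enough_time (s - x) (n - 1) x y = true) :
    is_enough_time (t - x) (n - 1) x y = true := by
  simp only [is_enough_time, ge_iff_le, decide_eq_true_eq] at *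
  have h1 := Int.ediv_le_ediv hx (show s - x ≤ t - x by omega)
  have h2 := Int.ediv_le_ediv hy (show s - x ≤ t - x by omega)
  rw [PySem.Int.floordiv_eq_ediv_of_pos hx, PySem.Int.floordiv_eq_ediv_of_pos hy] at *
  omega

-- the binary-search loop returns the least point ≥ low satisfying A's predicate
lemma loopA_spec (n x y low high : Int) (hle : low ≤ high)
    (hhigh : is_enough_time (high - x) (n - 1) x y = true) :
    low ≤ pvLoopA n x y low high ∧ pvLoopA n x y low high ≤ high ∧
    is_enough_time (pvLoopA n x y low high - x) (n - 1) x y = true ∧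
    (pvLoopA n x y low high = low ∨
      is_enough_time (pvLoopA n x y low high - 1 - x) (n - 1) x y = false) := by
  fun_induction pvLoopA n x y low high with
  | case1 low high h mid htest ih =>
    have hm : mid < high := (PySem.Int.floordiv_lt_iff_lt_mul (b := 2) (by omega)).2 (by omega)
    have hl : low ≤ mid := (PySem.Int.le_floordiv_iff_mul_le (b := 2) (by omega)).2 (by omega)
    obtain ⟨h1, h1b, h2, h3⟩ := ih hl htest
    exact ⟨h1, by omega, h2, h3⟩
  | case2 low high h mid htest ih =>
    have hm : mid < high := (PySem.Int.floordiv_lt_iff_lt_mul (b := 2) (by omega)).2 (by omega)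
    have hl : low ≤ mid := (PySem.Int.le_floordiv_iff_mul_le (b := 2) (by omega)).2 (by omega)
    obtain ⟨h1, h1b, h2, h3⟩ := ih (by omega) hhigh
    refine ⟨by omega, h1b, h2, ?_⟩
    rcases h3 with h3 | h3
    · right
      rw [h3]
      simpa using htest
    · right; exact h3
  | case3 low high h =>
    have : low = high := by omega
    exact ⟨le_refl _, by omega, this ▸ hhigh, Or.inl rfl⟩

-- with lo < 0, n ≤ 0 and hi > 0 the predicate holds on the whole search range, so the loop
-- collapses onto its lower end
lemma loopA_const (n lo hi : Int) (hlo : lo < 0) (hn : n ≤ 0) (hhi : 0 < hi) :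
    pvLoopA n lo hi lo (lo * n) = lo := by
  have hP : ∀ t : Int, lo - 1 ≤ t → t ≤ lo * n →
      is_enough_time (t - lo) (n - 1) lo hi = true := by
    intro t h1 h2
    simp only [is_enough_time, ge_iff_le, decide_eq_true_eq]
    set s := t - lo with hs
    have hq := PySem.Int.floordiv_mul_add_mod s lo
    have hm := PySem.Int.mod_neg_bounds (a := s) (b := lo) hlo
    set q := PySem.Int.floordiv s lo
    rcases le_or_gt 0 s with hs0 | hs0
    · have hq1 : n - 1 ≤ q := by nlinarith [hq, hm.1, hm.2]
      have hq2 : (0 : Int) ≤ PySem.Int.floordiv s hi :=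
        (PySem.Int.le_floordiv_iff_mul_le hhi).2 (by omega)
      omega
    · have hs1 : -1 ≤ s := by omega
      have hq1 : 0 ≤ q := by nlinarith [hq, hm.1, hm.2]
      have hq2 : (-1 : Int) ≤ PySem.Int.floordiv s hi :=
        (PySem.Int.le_floordiv_iff_mul_le hhi).2 (by omega)
      omega
  have hle : lo ≤ lo * n := by nlinarith
  obtain ⟨h1, h1b, h2, h3⟩ := loopA_spec n lo hi lo (lo * n) hle (by
    have := hP (lo * n) (by omega) le_rfl
    simpa using this)
  rcases h3 with h3 | h3
  · exact h3
  · have := hP (pvLoopA n lo hi lo (lo * n) - 1) (by omega) (by omega)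
    rw [show pvLoopA n lo hi lo (lo * n) - 1 - lo
        = pvLoopA n lo hi lo (lo * n) - 1 - lo from rfl] at this
    rw [this] at h3
    cases h3

-- the core equality, with lo = min, hi = max already extracted
lemma core (n lo hi : Int) (hlohi : lo ≤ hi) (hPre : ¬ (lo < 0 ∧ n ≤ 0 ∧ hi ≤ 0)) :
    pvLoopA n lo hi lo (lo * n) = min_time_to_copy_alt n lo hi := by
  rw [min_time_to_copy_alt]
  simp only [if_pos hlohi]
  by_cases hloop : lo < lo * n
  · rcases lt_trichotomy lo 0 with h0 | h0 | h0
    · -- lo < 0 forces n ≤ 0 (else the loop is empty), hence hi > 0 by Pre_: A collapses to lo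
      have hn0 : n ≤ 0 := by
        by_contra hc
        push_neg at hc
        exact absurd hloop (by push_neg; nlinarith)
      have hhi : 0 < hi := by omega
      rw [loopA_const n lo hi h0 hn0 hhi]
      simp [if_pos (Or.inl (by omega : n ≤ 1))]
    · exfalso; rw [h0] at hloop; simp at hloop
    · -- the real case: 0 < lo and n ≥ 2
      have hn2 : 2 ≤ n := by
        by_contra hc
        push_neg at hc
        exact absurd hloop (by push_neg; nlinarith)
      have hlo : 0 < lo := h0
      have hhi : 0 < hi := by omega
      have ht : 0 < lo + hi := by omega
      simp only [if_neg (by push_neg; omega : ¬ (n ≤ 1 ∨ lo ≤ 0))]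
      set k := n - 1 with hk
      set t := lo + hi with htdef
      set a := -(PySem.Int.floordiv (-(k * hi)) t) with ha
      set b := -(PySem.Int.floordiv (-(k * lo)) t) with hb
      have hka : (a - 1) * t < k * hi ∧ k * hi ≤ a * t :=
        (PySem.Int.neg_floordiv_neg_eq_iff_of_pos ht).1 ha.symm
      have hkb : (b - 1) * t < k * lo ∧ k * lo ≤ b * t :=
        (PySem.Int.neg_floordiv_neg_eq_iff_of_pos ht).1 hb.symm
      have hk1 : 1 ≤ k := by omega
      have ha1 : 1 ≤ a := by nlinarith [hka.2]
      have hb1 : 1 ≤ b := by nlinarith [hkb.2]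
      have habk : a + b ≤ k + 1 := by nlinarith [hka.1, hkb.1]
      set M := min (a * lo) (b * hi) with hM
      have halo : 0 < a * lo := by positivity
      have hbhi : 0 < b * hi := by positivity
      have hM0 : 0 < M := lt_min halo hbhi
      -- B's candidate M gets at least k copies
      have hfM : k ≤ M / lo + M / hi := by
        rcases min_choice (a * lo) (b * hi) with hmc | hmc
        · have h1 : M / lo = a := by
            simp only [hM, hmc]; exact Int.mul_ediv_cancel a (ne_of_gt hlo)
          have h2 : k - a ≤ M / hi := by
            simp only [hM, hmc]; rw [Int.le_ediv_iff_mul_le hhi]; nlinarith [hka.2]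
          omega
        · have h1 : M / hi = b := by
            simp only [hM, hmc]; exact Int.mul_ediv_cancel b (ne_of_gt hhi)
          have h2 : k - b ≤ M / lo := by
            simp only [hM, hmc]; rw [Int.le_ediv_iff_mul_le hlo]; nlinarith [hkb.2]
          omega
      -- and no smaller nonnegative time does
      have hmin : ∀ m : Int, 0 ≤ m → k ≤ m / lo + m / hi → M ≤ m := by
        intro m hm hfm
        by_cases hpa : a ≤ m / lo
        · have h1 : a * lo ≤ m / lo * lo := by nlinarith
          have h2 : m / lo * lo ≤ m := Int.ediv_mul_le m (ne_of_gt hlo)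
          have : M ≤ a * lo := min_le_left _ _
          omega
        · by_cases hqb : b ≤ m / hi
          · have h1 : b * hi ≤ m / hi * hi := by nlinarith
            have h2 : m / hi * hi ≤ m := Int.ediv_mul_le m (ne_of_gt hhi)
            have : M ≤ b * hi := min_le_right _ _
            omega
          · omega
      -- run the loop: it returns the least point ≥ lo whose predicate holds
      have hhighP : is_enough_time (lo * n - lo) (n - 1) lo hi = true := by
        simp only [is_enough_time, ge_iff_le, decide_eq_true_eq,
          PySem.Int.floordiv_eq_ediv_of_pos hlo, PySem.Int.floordiv_eq_ediv_of_pos hhi]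
        have he : lo * n - lo = k * lo := by rw [hk]; ring
        rw [he]
        have h1 : (k * lo) / lo = k := Int.mul_ediv_cancel k (ne_of_gt hlo)
        have h2 : 0 ≤ (k * lo) / hi := Int.ediv_nonneg (by positivity) (le_of_lt hhi)
        omega
      have hle : lo ≤ lo * n := by nlinarith
      obtain ⟨h1, h1b, h2, h3⟩ := loopA_spec n lo hi lo (lo * n) hle hhighP
      set r := pvLoopA n lo hi lo (lo * n) with hr
      have h2' : k ≤ (r - lo) / lo + (r - lo) / hi := by
        simpa only [is_enough_time, ge_iff_le, decide_eq_true_eq,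
          PySem.Int.floordiv_eq_ediv_of_pos hlo, PySem.Int.floordiv_eq_ediv_of_pos hhi, hk] using h2
      have hge : M ≤ r - lo := hmin (r - lo) (by omega) h2'
      have hPMtime : is_enough_time (M + lo - lo) (n - 1) lo hi = true := by
        simp only [is_enough_time, ge_iff_le, decide_eq_true_eq,
          PySem.Int.floordiv_eq_ediv_of_pos hlo, PySem.Int.floordiv_eq_ediv_of_pos hhi]
        have he : M + lo - lo = M := by ring
        rw [he, ← hk]
        exact hfM
      have hle2 : r ≤ M + lo := by
        rcases h3 with h3 | h3
        · omega
        · by_contra hcon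
          push_neg at hcon
          have := enough_mono (n := n) (x := lo) (y := hi) hlo hhi
            (show M + lo ≤ r - 1 by omega) hPMtime
          rw [this] at h3
          cases h3
      omega
  · -- the loop body never runs: both sides are lo
    have hdeg : n ≤ 1 ∨ lo ≤ 0 := by
      by_contra hc
      push_neg at hc
      exact hloop (by nlinarith [hc.1, hc.2])
    rw [pvLoopA]
    simp [hloop, hdeg]

-- reducing B's port at swapped arguments
lemma alt_swap (n x y : Int) (h : y < x) :
    min_time_to_copy_alt n x y = min_time_to_copy_alt n y x := by
  rw [min_time_to_copy_alt, min_time_to_copy_alt]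
  simp [not_le.2 h, le_of_lt h]

-- ===== VERDICT (by name: the statement is the Claim_ definition above) =====
theorem min_time_to_copy_spec : Claim_equal_min_time_to_copy := by
  intro n x y _ hPre
  unfold Pre_min_time_to_copy at hPre
  unfold Spec_min_time_to_copy
  rcases le_or_gt x y with hxy | hxy
  · rw [min_time_to_copy]
    simp only [if_neg (not_lt.2 hxy)]
    exact core n x y hxy (by rw [min_eq_left hxy, max_eq_right hxy] at hPre; exact hPre)
  · rw [min_time_to_copy]
    simp only [if_pos hxy]
    rw [alt_swap n x y hxy]
    exact core n y x (le_of_lt hxy) (by rw [min_eq_right (le_of_lt hxy), max_eq_left (le_of_lt hxy)] at hPre; exact hPre)
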